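-- pv_equiv track=rewrite | github.com/JJ503/Algorithm | Implementation/[Programmers] 프렌즈4블록.py | solution
-- ===== SOURCE A (Python) =====
-- def solution(m, n, board):
--     answer = 0
--     boardList = []
--
--     for i in range(m):
--         temp = []
--         for j in range(n):
--             temp.append(board[i][j])
--
--         boardList.append(temp)
--
--     while True:
--         fourBlock = [[0] * n for _ in range(m)]
--
--         for i in range(m - 1):
--             for j in range(n - 1):
--                 temp = boardList[i][j]
--                 if temp != 0 and boardList[i][j+1] == temp and boardList[i+1][j] == temp and boardList[i+1][j+1] == temp:
--                     fourBlock[i][j] = 1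
--                     fourBlock[i][j+1] = 1
--                     fourBlock[i+1][j] = 1
--                     fourBlock[i+1][j+1] = 1
--
--         count = 0
--         for i in range(len(fourBlock)):
--             count += sum(fourBlock[i])
--
--         if count == 0:
--             break
--
--         answer += count
--
--         for i in range(m-1, -1, -1):
--             for j in range(n):
--                 if fourBlock[i][j] == 1:
--                     b = i - 1
--                     while b >= 0 and fourBlock[b][j] == 1:
--                         b -= 1
--                     if b < 0:
--                         boardList[i][j] = 0
--                     else:
--                         boardList[i][j] = boardList[b][j]
--                         fourBlock[b][j] = 1
--
--     return answer
-- ===== SOURCE B (Python) =====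
-- def solution(m, n, board):
--     # Fresh copy of the board; equivalence is about the return value (A mutates only its own copy too).
--     grid = [[board[i][j] for j in range(n)] for i in range(m)]
--     answer = 0
--     while True:
--         coords = set()
--         for i in range(m - 1):
--             for j in range(n - 1):
--                 v = grid[i][j]
--                 if v != 0 and v == grid[i][j + 1] == grid[i + 1][j] == grid[i + 1][j + 1]:
--                     coords.update({(i, j), (i, j + 1), (i + 1, j), (i + 1, j + 1)})
--         if not coords:
--             return answer
--         answer += len(coords)
--         newcols = []
--         for j in range(n):
--             survivors = [grid[i][j] for i in range(m) if (i, j) not in coords]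
--             newcols.append([0] * (m - len(survivors)) + survivors)
--         grid = [[newcols[j][i] for j in range(n)] for i in range(m)]
-- ===== Notes on version B (the rewrite author's own statement) =====
-- stated objective: simpler
-- what changed: B replaces A's in-place bottom-up gravity (each marked cell pulls the nearest unmarked cell above it, mutating the mask as it goes) by rebuilding every column functionally as zero-padding followed by the surviving cells, and tracks removed cells as a set of coordinates instead of a 0/1 mask grid summed row by row.
import Mathlib
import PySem

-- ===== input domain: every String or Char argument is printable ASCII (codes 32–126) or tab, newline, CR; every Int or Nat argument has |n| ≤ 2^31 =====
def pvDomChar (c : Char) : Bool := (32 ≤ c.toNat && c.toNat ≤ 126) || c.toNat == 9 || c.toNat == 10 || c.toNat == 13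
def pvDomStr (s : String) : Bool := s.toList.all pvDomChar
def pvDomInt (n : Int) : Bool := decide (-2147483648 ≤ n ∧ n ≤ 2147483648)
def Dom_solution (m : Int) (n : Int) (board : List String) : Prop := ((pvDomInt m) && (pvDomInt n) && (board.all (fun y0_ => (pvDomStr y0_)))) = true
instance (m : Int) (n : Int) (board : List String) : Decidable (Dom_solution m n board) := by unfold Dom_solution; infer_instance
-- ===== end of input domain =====

-- B replaces A's in-place bottom-up "pull the nearest unmarked cell down" gravity by rebuilding each
-- column as zero-padding ++ survivors, and tracks removed cells as a set of coordinates instead of a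
-- 0/1 mask grid (objective: simpler; return value only — A mutates nothing the caller sees).

-- shared 2-d helpers (both Pythons read/copy the board the same way)
def pvGet2 {α : Type} (g : List (List α)) (d : α) (i j : Int) : α :=
  (g.getD i.toNat []).getD j.toNat d

def pvSet2 {α : Type} (g : List (List α)) (i j : Nat) (v : α) : List (List α) :=
  g.modify i (fun row => row.set j v)

-- boardList = [[board[i][j] for j in range(n)] for i in range(m)]  (cell: some c; `0` of the Python is none)
def pvGrid (m n : Int) (board : List String) : List (List (Option Char)) :=
  (PySem.List.pyRange 0 m 1).map (fun i =>
    (PySem.List.pyRange 0 n 1).map (fun j =>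
      PySem.Str.pyGet? ((PySem.List.pyGet? board i).getD "") j))

-- ===== PORT A =====

-- b = i-1; while b >= 0 and fourBlock[b][j] == 1: b -= 1
def pvFindB (f : List (List Int)) (j : Int) (b : Int) : Int :=
  if h : 0 ≤ b ∧ pvGet2 f 0 b j = 1 then pvFindB f j (b - 1) else b
termination_by (b + 1).toNat
decreasing_by omega

-- fourBlock construction: [[0]*n …] then the anchor double loop setting the four cells to 1
def pvMark (g : List (List (Option Char))) (m n : Int) : List (List Int) :=
  (PySem.List.pyRange 0 (m-1) 1).foldl (fun f i =>
    (PySem.List.pyRange 0 (n-1) 1).foldl (fun f j =>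
      let t := pvGet2 g none i j
      if t ≠ none ∧ pvGet2 g none i (j+1) = pvGet2 g none i j ∧ pvGet2 g none (i+1) j = pvGet2 g none i j ∧ pvGet2 g none (i+1) (j+1) = pvGet2 g none i j then
        pvSet2 (pvSet2 (pvSet2 (pvSet2 f i.toNat j.toNat 1) i.toNat (j+1).toNat 1) (i+1).toNat j.toNat 1) (i+1).toNat (j+1).toNat 1
      else f) f)
    ((PySem.List.pyRange 0 m 1).map (fun _ => List.replicate n.toNat (0:Int)))

-- count = 0; for i in range(len(fourBlock)): count += sum(fourBlock[i])
def pvCount (f : List (List Int)) : Int :=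
  (PySem.List.pyRange 0 (f.length : Int) 1).foldl (fun c i => c + (f.getD i.toNat []).sum) 0

-- the in-place gravity double loop (i from m-1 down to 0, j from 0 to n-1) on (boardList, fourBlock)
def pvGrav (m n : Int) (st : (List (List (Option Char))) × (List (List Int))) :
    (List (List (Option Char))) × (List (List Int)) :=
  (PySem.List.pyRange (m-1) (-1) (-1)).foldl (fun st i =>
    (PySem.List.pyRange 0 n 1).foldl (fun st j =>
      if pvGet2 st.2 0 i j = 1 then
        let b := pvFindB st.2 j (i - 1)
        if b < 0 then (pvSet2 st.1 i.toNat j.toNat none, st.2)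
        else (pvSet2 st.1 i.toNat j.toNat (pvGet2 st.1 none b j), pvSet2 st.2 b.toNat j.toNat 1)
      else st) st) st

-- while True: … (fuel m*n+1 is enough: every productive round removes ≥ 4 of the ≤ m*n stones)
def pvLoopA (fuel : Nat) (m n : Int) (g : List (List (Option Char))) (ans : Int) : Int :=
  match fuel with
  | 0 => ans
  | fuel+1 =>
    let f := pvMark g m n
    let count := pvCount f
    if count = 0 then ans
    else pvLoopA fuel m n (pvGrav m n (g, f)).1 (ans + count)

def solution (m : Int) (n : Int) (board : List String) : Int :=
  pvLoopA (m.toNat * n.toNat + 1) m n (pvGrid m n board) 0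

-- ===== PORT B =====

-- coords: the removed cells as a set of (i, j)
def pvCoords (g : List (List (Option Char))) (m n : Int) : PySem.Set (Int × Int) :=
  (PySem.List.pyRange 0 (m-1) 1).foldl (fun s i =>
    (PySem.List.pyRange 0 (n-1) 1).foldl (fun s j =>
      let v := pvGet2 g none i j
      if v ≠ none ∧ v = pvGet2 g none i (j+1) ∧ pvGet2 g none i (j+1) = pvGet2 g none (i+1) j ∧ pvGet2 g none (i+1) j = pvGet2 g none (i+1) (j+1) then
        PySem.Set.update s [(i,j),(i,j+1),(i+1,j),(i+1,j+1)]
      else s) s) PySem.Set.empty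

-- per column: survivors, then [0]*(m-len(survivors)) + survivors; rebuild the grid row-major
def pvRepack (g : List (List (Option Char))) (coords : PySem.Set (Int × Int)) (m n : Int) :
    List (List (Option Char)) :=
  let newcols := (PySem.List.pyRange 0 n 1).map (fun j =>
    let survivors := ((PySem.List.pyRange 0 m 1).filter (fun i => !(PySem.Set.contains coords (i, j)))).map (fun i => pvGet2 g none i j)
    List.replicate (m - (survivors.length : Int)).toNat (none : Option Char) ++ survivors)
  (PySem.List.pyRange 0 m 1).map (fun i => (PySem.List.pyRange 0 n 1).map (fun j => pvGet2 newcols none j i))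

def pvLoopB (fuel : Nat) (m n : Int) (g : List (List (Option Char))) (ans : Int) : Int :=
  match fuel with
  | 0 => ans
  | fuel+1 =>
    let coords := pvCoords g m n
    if coords.isEmpty then ans
    else pvLoopB fuel m n (pvRepack g coords m n) (ans + (coords.length : Int))

def solution_alt (m : Int) (n : Int) (board : List String) : Int :=
  pvLoopB (m.toNat * n.toNat + 1) m n (pvGrid m n board) 0

-- ===== PRECONDITION & SPEC =====
-- Pre excludes exactly the inputs where A raises IndexError: with n > 0, fewer than m rows, or a
-- used row shorter than n (with n ≤ 0 the copy loop never indexes the board and A is total).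
def Pre_solution (m : Int) (n : Int) (board : List String) : Prop :=
  n ≤ 0 ∨ (m ≤ (board.length : Int) ∧ ∀ s ∈ board.take m.toNat, n ≤ PySem.Str.len s)
instance (m : Int) (n : Int) (board : List String) : Decidable (Pre_solution m n board) := by unfold Pre_solution; infer_instance

def pvWitness_solution : Int × Int × List String := (2, 2, ["AA", "AA"])

def Spec_solution (m : Int) (n : Int) (board : List String) (out : Int) : Prop := out = solution_alt m n board
instance (m : Int) (n : Int) (board : List String) (out : Int) : Decidable (Spec_solution m n board out) := by unfold Spec_solution; infer_instance

-- ===== CLAIM (what is proved, stated in full; the proofs are below) =====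
def Claim_equal_solution : Prop := ∀ (m : Int) (n : Int) (board : List String), Dom_solution m n board → Pre_solution m n board → Spec_solution m n board (solution m n board)


-- ===== LEMMAS AND PROOFS =====

-- ---------- generic 2-d helpers ----------

-- column j of a grid (entries via getD, default d)
def colF {α : Type} (j : Nat) (g : List (List α)) (d : α) : List α :=
  g.map (fun r => r.getD j d)

def WFg {α : Type} (N : Nat) (g : List (List α)) : Prop := ∀ r ∈ g, r.length = N

theorem getD_colF {α : Type} (g : List (List α)) (d : α) (j i : Nat) :
    (colF j g d).getD i d = (g.getD i []).getD j d := by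
  induction g generalizing i with
  | nil => simp [colF]
  | cons r g ih =>
    cases i with
    | zero => simp [colF]
    | succ i => simpa [colF] using ih i

theorem pvGet2_colF {α : Type} (g : List (List α)) (d : α) (i j : Int) :
    pvGet2 g d i j = (colF j.toNat g d).getD i.toNat d := by
  rw [getD_colF]; rfl

theorem length_colF {α : Type} (g : List (List α)) (d : α) (j : Nat) :
    (colF j g d).length = g.length := by simp [colF]

theorem length_pvSet2 {α : Type} (g : List (List α)) (i j : Nat) (v : α) :
    (pvSet2 g i j v).length = g.length := by simp [pvSet2]

theorem mem_set_of_mem {α : Type} {r : List α} {j : Nat} {v x : α}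
    (hx : x ∈ r.set j v) : x = v ∨ x ∈ r := by
  induction r generalizing j with
  | nil => simp at hx
  | cons a r ih =>
    cases j with
    | zero =>
      rcases List.mem_cons.mp hx with hx | hx
      · exact Or.inl hx
      · exact Or.inr (by simp [hx])
    | succ j =>
      rcases List.mem_cons.mp hx with hx | hx
      · exact Or.inr (by simp [hx])
      · rcases ih hx with h | h
        · exact Or.inl h
        · exact Or.inr (by simp [h])

theorem mem_pvSet2_of_mem {α : Type} {g : List (List α)} {i j : Nat} {v : α}
    {r : List α} (hr : r ∈ pvSet2 g i j v) :
    r ∈ g ∨ ∃ r₀ ∈ g, r = r₀.set j v := by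
  induction g generalizing i with
  | nil => simp [pvSet2] at hr
  | cons a g ih =>
    cases i with
    | zero =>
      rcases List.mem_cons.mp hr with hr | hr
      · exact Or.inr ⟨a, by simp, hr⟩
      · exact Or.inl (by simp [hr])
    | succ i =>
      rcases List.mem_cons.mp hr with hr | hr
      · exact Or.inl (by simp [hr])
      · rcases ih hr with h | ⟨r₀, hr₀, he⟩
        · exact Or.inl (by simp [h])
        · exact Or.inr ⟨r₀, by simp [hr₀], he⟩

theorem WFg_pvSet2 {α : Type} {N : Nat} {g : List (List α)} (h : WFg N g)
    (i j : Nat) (v : α) : WFg N (pvSet2 g i j v) := by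
  intro r hr
  rcases mem_pvSet2_of_mem hr with h1 | ⟨r₀, hr₀, he⟩
  · exact h r h1
  · rw [he, List.length_set]; exact h r₀ hr₀

theorem colF_pvSet2_ne {α : Type} (g : List (List α)) (d : α) (i j j' : Nat)
    (v : α) (hne : j' ≠ j) : colF j' (pvSet2 g i j v) d = colF j' g d := by
  induction g generalizing i with
  | nil => simp [pvSet2, colF]
  | cons r g ih =>
    cases i with
    | zero =>
      simp only [pvSet2, List.modify, colF, List.map]
      congr 1
      simp [List.getD_eq_getElem?_getD, List.getElem?_set, hne.symm]
    | succ i => simpa [pvSet2, colF] using ih i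

theorem colF_pvSet2_eq {α : Type} {N : Nat} (g : List (List α)) (d : α) (i j : Nat)
    (v : α) (hwf : WFg N g) (hj : j < N) :
    colF j (pvSet2 g i j v) d = (colF j g d).set i v := by
  induction g generalizing i with
  | nil => simp [pvSet2, colF]
  | cons r g ih =>
    cases i with
    | zero =>
      have hr : r.length = N := hwf r (by simp)
      simp only [pvSet2, List.modify, colF, List.map, List.set]
      congr 1
      simp [List.getD_eq_getElem?_getD, List.getElem?_set, hr, hj]
    | succ i =>
      have := ih i (fun r hr => hwf r (by simp [hr]))
      simpa [pvSet2, colF] using this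

theorem getD_pvSet2_self (f : List (List Int)) (i j : Nat) (v : Int)
    (hi : i < f.length) (hj : j < (f.getD i []).length) :
    pvGet2 (pvSet2 f i j v) 0 (i : Int) (j : Int) = v := by
  simp only [pvGet2, Int.toNat_natCast, pvSet2]
  rw [List.modify_eq_set]
  simp only [List.getD_eq_getElem?_getD, List.getElem?_set, if_pos rfl, if_pos hi]
  have : f[i]?.getD default = f[i]'hi := by simp [List.getElem?_eq_getElem hi]
  rw [this]
  have hj' : j < (f[i]'hi).length := by
    simpa [List.getD_eq_getElem?_getD, List.getElem?_eq_getElem hi] using hj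
  simp [List.getElem?_set, hj']

theorem getD_pvSet2_ne (f : List (List Int)) (i j : Nat) (v : Int)
    (i' j' : Nat) (hne : ¬(i' = i ∧ j' = j)) :
    pvGet2 (pvSet2 f i j v) 0 (i' : Int) (j' : Int) = pvGet2 f 0 (i' : Int) (j' : Int) := by
  simp only [pvGet2, Int.toNat_natCast, pvSet2]
  rw [List.modify_eq_set]
  by_cases hii : i = i'
  · subst hii
    have hjj : j ≠ j' := fun h => hne ⟨rfl, h.symm⟩
    simp only [List.getD_eq_getElem?_getD, List.getElem?_set, if_pos rfl]
    by_cases hi : i < f.length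
    · simp only [if_pos hi]
      have : f[i]?.getD default = f[i]'hi := by simp [List.getElem?_eq_getElem hi]
      rw [this]
      simp [List.getElem?_set, hjj, List.getElem?_eq_getElem hi]
    · simp [if_neg hi, List.getElem?_eq_none (Nat.le_of_not_lt hi)]
  · simp [List.getD_eq_getElem?_getD, List.getElem?_set, hii]

-- sum of all entries after a single in-range set
theorem sum_set_row (r : List Int) (j : Nat) (v : Int) (hj : j < r.length) :
    (r.set j v).sum = r.sum - r.getD j 0 + v := by
  rw [List.sum_set]
  have hdrop := List.drop_eq_getElem_cons hj
  have hsum : r.sum = (r.take j).sum + (r.drop j).sum :=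
    (List.sum_take_add_sum_drop r j).symm
  rw [hdrop] at hsum
  simp only [List.sum_cons] at hsum
  have : r.getD j 0 = r[j]'hj := by simp [List.getD_eq_getElem?_getD, List.getElem?_eq_getElem hj]
  rw [if_pos hj]
  omega

theorem sumG_pvSet2 (f : List (List Int)) (i j : Nat) (v : Int)
    (hi : i < f.length) (hj : j < (f.getD i []).length) :
    ((pvSet2 f i j v).map List.sum).sum
      = (f.map List.sum).sum - pvGet2 f 0 (i : Int) (j : Int) + v := by
  simp only [pvSet2]
  rw [List.modify_eq_set]
  have hfi : f[i]?.getD default = f[i]'hi := by simp [List.getElem?_eq_getElem hi]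
  rw [hfi, List.map_set]
  have hjj : j < (f[i]'hi).length := by
    simpa [List.getD_eq_getElem?_getD, List.getElem?_eq_getElem hi] using hj
  have h1 : ((f[i]'hi).set j v).sum = (f[i]'hi).sum - (f[i]'hi).getD j 0 + v :=
    sum_set_row _ j v hjj
  have h2 := sum_set_row ((f.map List.sum)) i (((f[i]'hi).set j v).sum) (by simpa using hi)
  rw [h2]
  have h3 : (f.map List.sum).getD i 0 = (f[i]'hi).sum := by
    simp [List.getD_eq_getElem?_getD, List.getElem?_map, List.getElem?_eq_getElem hi]
  have h4 : pvGet2 f 0 (i : Int) (j : Int) = (f[i]'hi).getD j 0 := by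
    simp [pvGet2, List.getD_eq_getElem?_getD, List.getElem?_eq_getElem hi]
  omega

-- ---------- the marking invariant ----------

def SInv (f : List (List Int)) (s : List (Int × Int)) (M N : Nat) : Prop :=
  s.Nodup ∧ (f.map List.sum).sum = (s.length : Int) ∧
  (∀ i j : Int, 0 ≤ i → 0 ≤ j → (pvGet2 f 0 i j = 1 ↔ (i, j) ∈ s)) ∧
  (∀ r ∈ f, ∀ x ∈ r, x = 0 ∨ x = 1) ∧ f.length = M ∧ WFg N f

theorem pvGet2_mem_or_default {α : Type} (L : List (List α)) (d : α) (i j : Int) :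
    (∃ r ∈ L, pvGet2 L d i j ∈ r) ∨ pvGet2 L d i j = d := by
  unfold pvGet2
  by_cases h1 : i.toNat < L.length
  · have hrow : L.getD i.toNat [] = L[i.toNat]'h1 := by
      simp [List.getD_eq_getElem?_getD, List.getElem?_eq_getElem h1]
    rw [hrow]
    by_cases h2 : j.toNat < (L[i.toNat]'h1).length
    · left
      refine ⟨L[i.toNat]'h1, List.getElem_mem h1, ?_⟩
      have hgd : (L[i.toNat]'h1).getD j.toNat d = (L[i.toNat]'h1)[j.toNat]'h2 := by
        simp [List.getD_eq_getElem?_getD, List.getElem?_eq_getElem h2]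
      rw [hgd]
      exact List.getElem_mem h2
    · right
      simp [List.getD_eq_getElem?_getD, List.getElem?_eq_none (Nat.le_of_not_lt h2)]
  · right
    have hrow : L.getD i.toNat [] = [] := by
      simp [List.getD_eq_getElem?_getD, List.getElem?_eq_none (Nat.le_of_not_lt h1)]
    rw [hrow]
    rfl

theorem sinv_add {f s M N} (h : SInv f s M N) (i j : Int) (h0i : 0 ≤ i) (h0j : 0 ≤ j)
    (hi : i.toNat < M) (hj : j.toNat < N) :
    SInv (pvSet2 f i.toNat j.toNat 1) (PySem.Set.add s (i, j)) M N := by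
  obtain ⟨hnd, hsum, hiff, h01, hlen, hwf⟩ := h
  have hif : i.toNat < f.length := by omega
  have hrowmem : f.getD i.toNat [] = f[i.toNat]'hif := by
    simp [List.getD_eq_getElem?_getD, List.getElem?_eq_getElem hif]
  have hrowlen : (f.getD i.toNat []).length = N := by
    rw [hrowmem]; exact hwf _ (List.getElem_mem hif)
  have hjf : j.toNat < (f.getD i.toNat []).length := by omega
  have hci : ((i.toNat : Int)) = i := Int.toNat_of_nonneg h0i
  have hcj : ((j.toNat : Int)) = j := Int.toNat_of_nonneg h0j
  have hself : pvGet2 (pvSet2 f i.toNat j.toNat 1) 0 i j = 1 := by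
    rw [← hci, ← hcj]; exact getD_pvSet2_self f i.toNat j.toNat 1 hif hjf
  have hold01 : pvGet2 f 0 i j = 0 ∨ pvGet2 f 0 i j = 1 := by
    rcases pvGet2_mem_or_default f 0 i j with ⟨r, hr, hx⟩ | hx
    · exact h01 r hr _ hx
    · exact Or.inl hx
  have hsum' := sumG_pvSet2 f i.toNat j.toNat 1 hif hjf
  rw [hci, hcj] at hsum'
  have hiff_new : ∀ i' j' : Int, 0 ≤ i' → 0 ≤ j' →
      (pvGet2 (pvSet2 f i.toNat j.toNat 1) 0 i' j' = 1 ↔ (i', j') ∈ s ∨ (i', j') = (i, j)) := by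
    intro i' j' h0i' h0j'
    by_cases heq : i' = i ∧ j' = j
    · obtain ⟨rfl, rfl⟩ := heq
      simp [hself]
    · have hne : ¬(i'.toNat = i.toNat ∧ j'.toNat = j.toNat) := by omega
      have hg := getD_pvSet2_ne f i.toNat j.toNat 1 i'.toNat j'.toNat hne
      rw [Int.toNat_of_nonneg h0i', Int.toNat_of_nonneg h0j'] at hg
      rw [hg, hiff i' j' h0i' h0j']
      constructor
      · exact fun hm => Or.inl hm
      · rintro (hm | hm)
        · exact hm
        · exact absurd (by simpa [Prod.ext_iff] using hm) heq
  have h01_new : ∀ r ∈ pvSet2 f i.toNat j.toNat 1, ∀ x ∈ r, x = 0 ∨ x = 1 := by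
    intro r hr x hx
    rcases mem_pvSet2_of_mem hr with hr' | ⟨r₀, hr₀, rfl⟩
    · exact h01 r hr' x hx
    · rcases mem_set_of_mem hx with hx' | hx'
      · exact Or.inr hx'
      · exact h01 r₀ hr₀ x hx'
  by_cases hmem : (i, j) ∈ s
  · have hadd : PySem.Set.add s (i, j) = s := by
      unfold PySem.Set.add
      rw [if_pos ((PySem.Set.contains_iff s (i, j)).mpr hmem)]
    have hold : pvGet2 f 0 i j = 1 := (hiff i j h0i h0j).mpr hmem
    refine ⟨by rw [hadd]; exact hnd, ?_, ?_, h01_new, by rw [length_pvSet2]; omega, WFg_pvSet2 hwf _ _ _⟩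
    · rw [hadd, hsum', hold, hsum]; ring
    · intro i' j' h0i' h0j'
      rw [hadd, hiff_new i' j' h0i' h0j']
      constructor
      · rintro (hm | hm)
        · exact hm
        · rw [hm]; exact hmem
      · exact fun hm => Or.inl hm
  · have hcont : PySem.Set.contains s (i, j) = false := by
      cases hb : PySem.Set.contains s (i, j)
      · rfl
      · exact absurd ((PySem.Set.contains_iff s (i, j)).mp hb) hmem
    have hadd : PySem.Set.add s (i, j) = s ++ [(i, j)] := by
      unfold PySem.Set.add
      rw [hcont]
      rfl
    have hold : pvGet2 f 0 i j = 0 := by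
      rcases hold01 with hx | hx
      · exact hx
      · exact absurd ((hiff i j h0i h0j).mp hx) hmem
    refine ⟨?_, ?_, ?_, h01_new, by rw [length_pvSet2]; omega, WFg_pvSet2 hwf _ _ _⟩
    · rw [hadd]
      exact List.Nodup.append hnd (List.nodup_singleton _) (by simpa using hmem)
    · rw [hadd, hsum', hold, hsum]
      simp only [List.length_append, List.length_cons, List.length_nil]
      push_cast
      ring
    · intro i' j' h0i' h0j'
      rw [hadd, hiff_new i' j' h0i' h0j']
      simp

theorem sinv_fold_update {f s M N} (h : SInv f s M N) (i j : Int)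
    (h0i : 0 ≤ i) (h0j : 0 ≤ j) (hi1 : i.toNat + 1 < M) (hj1 : j.toNat + 1 < N) :
    SInv
      (pvSet2 (pvSet2 (pvSet2 (pvSet2 f i.toNat j.toNat 1) i.toNat (j+1).toNat 1) (i+1).toNat j.toNat 1) (i+1).toNat (j+1).toNat 1)
      (PySem.Set.update s [(i,j),(i,j+1),(i+1,j),(i+1,j+1)]) M N := by
  have h1 := sinv_add h i j h0i h0j (by omega) (by omega)
  have h2 := sinv_add h1 i (j+1) h0i (by omega) (by omega) (by omega)
  have h3 := sinv_add h2 (i+1) j (by omega) h0j (by omega) (by omega)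
  have h4 := sinv_add h3 (i+1) (j+1) (by omega) (by omega) (by omega) (by omega)
  have hupd : PySem.Set.update s [(i,j),(i,j+1),(i+1,j),(i+1,j+1)]
      = PySem.Set.add (PySem.Set.add (PySem.Set.add (PySem.Set.add s (i,j)) (i,j+1)) (i+1,j)) (i+1,j+1) := rfl
  rw [hupd]
  exact h4

-- marking fold bodies, named (definitionally equal to the lambdas in pvMark / pvCoords)
def stepMA (g : List (List (Option Char))) (i : Int) (f : List (List Int)) (j : Int) :
    List (List Int) :=
  if pvGet2 g none i j ≠ none ∧ pvGet2 g none i (j+1) = pvGet2 g none i j ∧ pvGet2 g none (i+1) j = pvGet2 g none i j ∧ pvGet2 g none (i+1) (j+1) = pvGet2 g none i j then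
    pvSet2 (pvSet2 (pvSet2 (pvSet2 f i.toNat j.toNat 1) i.toNat (j+1).toNat 1) (i+1).toNat j.toNat 1) (i+1).toNat (j+1).toNat 1
  else f

def stepMB (g : List (List (Option Char))) (i : Int) (s : PySem.Set (Int × Int)) (j : Int) :
    PySem.Set (Int × Int) :=
  if pvGet2 g none i j ≠ none ∧ pvGet2 g none i j = pvGet2 g none i (j+1) ∧ pvGet2 g none i (j+1) = pvGet2 g none (i+1) j ∧ pvGet2 g none (i+1) j = pvGet2 g none (i+1) (j+1) then
    PySem.Set.update s [(i,j),(i,j+1),(i+1,j),(i+1,j+1)]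
  else s

theorem pvMark_eq_fold (g : List (List (Option Char))) (m n : Int) :
    pvMark g m n
      = (PySem.List.pyRange 0 (m-1) 1).foldl (fun f i => (PySem.List.pyRange 0 (n-1) 1).foldl (stepMA g i) f)
          ((PySem.List.pyRange 0 m 1).map (fun _ => List.replicate n.toNat (0:Int))) := rfl

theorem pvCoords_eq_fold (g : List (List (Option Char))) (m n : Int) :
    pvCoords g m n
      = (PySem.List.pyRange 0 (m-1) 1).foldl (fun s i => (PySem.List.pyRange 0 (n-1) 1).foldl (stepMB g i) s)
          PySem.Set.empty := rfl

theorem stepM_sync (g : List (List (Option Char))) {m n : Int} {M N : Nat}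
    (hM : M = m.toNat) (hN : N = n.toNat) (i j : Int)
    (hi : 0 ≤ i ∧ i < m - 1) (hj : 0 ≤ j ∧ j < n - 1)
    {f s} (h : SInv f s M N) : SInv (stepMA g i f j) (stepMB g i s j) M N := by
  unfold stepMA stepMB
  by_cases hcB : pvGet2 g none i j ≠ none ∧ pvGet2 g none i j = pvGet2 g none i (j+1) ∧ pvGet2 g none i (j+1) = pvGet2 g none (i+1) j ∧ pvGet2 g none (i+1) j = pvGet2 g none (i+1) (j+1)
  · have hcA : pvGet2 g none i j ≠ none ∧ pvGet2 g none i (j+1) = pvGet2 g none i j ∧ pvGet2 g none (i+1) j = pvGet2 g none i j ∧ pvGet2 g none (i+1) (j+1) = pvGet2 g none i j :=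
      ⟨hcB.1, hcB.2.1.symm, (hcB.2.1.trans hcB.2.2.1).symm, ((hcB.2.1.trans hcB.2.2.1).trans hcB.2.2.2).symm⟩
    rw [if_pos hcA, if_pos hcB]
    exact sinv_fold_update h i j hi.1 hj.1 (by omega) (by omega)
  · have hcA : ¬(pvGet2 g none i j ≠ none ∧ pvGet2 g none i (j+1) = pvGet2 g none i j ∧ pvGet2 g none (i+1) j = pvGet2 g none i j ∧ pvGet2 g none (i+1) (j+1) = pvGet2 g none i j) := by
      intro hA
      exact hcB ⟨hA.1, hA.2.1.symm, hA.2.1.trans hA.2.2.1.symm, hA.2.2.1.trans hA.2.2.2.symm⟩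
    rw [if_neg hcA, if_neg hcB]
    exact h

theorem sinv_inner (g : List (List (Option Char))) {m n : Int} {M N : Nat}
    (hM : M = m.toNat) (hN : N = n.toNat) (i : Int) (hi : 0 ≤ i ∧ i < m - 1) :
    ∀ (js : List Int), (∀ j ∈ js, 0 ≤ j ∧ j < n - 1) → ∀ f s, SInv f s M N →
      SInv (js.foldl (stepMA g i) f) (js.foldl (stepMB g i) s) M N := by
  intro js
  induction js with
  | nil => intro _ f s h; exact h
  | cons j js ih =>
    intro hjs f s h
    simp only [List.foldl_cons]
    exact ih (fun x hx => hjs x (by simp [hx])) _ _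
      (stepM_sync g hM hN i j hi (hjs j (by simp)) h)

theorem sinv_outer (g : List (List (Option Char))) {m n : Int} {M N : Nat}
    (hM : M = m.toNat) (hN : N = n.toNat) :
    ∀ (is : List Int), (∀ i ∈ is, 0 ≤ i ∧ i < m - 1) → ∀ f s, SInv f s M N →
      SInv (is.foldl (fun f i => (PySem.List.pyRange 0 (n-1) 1).foldl (stepMA g i) f) f)
           (is.foldl (fun s i => (PySem.List.pyRange 0 (n-1) 1).foldl (stepMB g i) s) s) M N := by
  intro is
  induction is with
  | nil => intro _ f s h; exact h
  | cons i is ih =>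
    intro his f s h
    simp only [List.foldl_cons]
    refine ih (fun x hx => his x (by simp [hx])) _ _ ?_
    refine sinv_inner g hM hN i (his i (by simp)) _ ?_ f s h
    intro j hj
    have := (PySem.List.mem_pyRange_one (a := 0) (b := n-1) (x := j)).mp hj
    omega

theorem mark_sync (g : List (List (Option Char))) (m n : Int) :
    SInv (pvMark g m n) (pvCoords g m n) m.toNat n.toNat := by
  rw [pvMark_eq_fold, pvCoords_eq_fold]
  refine sinv_outer g rfl rfl (PySem.List.pyRange 0 (m-1) 1) ?_ _ _ ?_
  · intro i hi
    have := (PySem.List.mem_pyRange_one (a := 0) (b := m-1) (x := i)).mp hi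
    omega
  · -- initial invariant
    refine ⟨List.nodup_nil, ?_, ?_, ?_, ?_, ?_⟩
    · have hz : ∀ r ∈ (PySem.List.pyRange 0 m 1).map (fun _ => List.replicate n.toNat (0:Int)),
          List.sum r = 0 := by
        intro r hr
        obtain ⟨_, _, rfl⟩ := List.mem_map.mp hr
        simp [List.sum_replicate]
      rw [List.map_congr_left (fun r hr => hz r hr), List.map_const', List.sum_replicate, smul_zero]
      norm_num
    · intro i j _ _
      refine iff_of_false ?_ (by simp)
      intro hx
      rcases pvGet2_mem_or_default ((PySem.List.pyRange 0 m 1).map (fun _ => List.replicate n.toNat (0:Int))) 0 i j with ⟨r, hr, hmem⟩ | hd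
      · obtain ⟨_, _, rfl⟩ := List.mem_map.mp hr
        rw [hx] at hmem
        have := List.eq_of_mem_replicate hmem
        omega
      · omega
    · intro r hr x hx
      obtain ⟨_, _, rfl⟩ := List.mem_map.mp hr
      exact Or.inl (List.eq_of_mem_replicate hx)
    · simp [PySem.List.length_pyRange_one]
    · intro r hr
      obtain ⟨_, _, rfl⟩ := List.mem_map.mp hr
      simp

theorem count_eq {f : List (List Int)} {s M N} (h : SInv f s M N) :
    pvCount f = (s.length : Int) := by
  obtain ⟨-, hsum, -⟩ := h
  rw [← hsum]
  unfold pvCount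
  rw [PySem.List.pyRange_zero_nat f.length, List.foldl_map]
  simp only [Int.toNat_natCast]
  rw [PySem.List.foldl_add]
  simp only [zero_add]
  have h2 : (List.range f.length).map (fun k => (f.getD k []).sum)
      = ((List.range f.length).map (fun k => f.getD k [])).map List.sum := by
    rw [List.map_map]; rfl
  have h3 : (List.range f.length).map (fun k => f.getD k []) = f := by
    apply List.ext_getElem
    · simp
    · intro i h1 h2
      simp [List.getD_eq_getElem?_getD, List.getElem?_eq_getElem h2]
  rw [h2, h3]

theorem foldl_id_aux {α β : Type} (l : List α) (s : β) : l.foldl (fun s _ => s) s = s := by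
  induction l generalizing s with
  | nil => rfl
  | cons a l ih => simpa using ih s

theorem coords_empty_small {g : List (List (Option Char))} {m n : Int}
    (h : m - 1 ≤ 0 ∨ n - 1 ≤ 0) : pvCoords g m n = [] := by
  rw [pvCoords_eq_fold]
  rcases h with h | h
  · have he : PySem.List.pyRange 0 (m-1) 1 = [] := by
      rw [PySem.List.pyRange_one]
      have hz : (m - 1 - 0).toNat = 0 := by omega
      rw [hz]
      simp
    simp [he, PySem.Set.empty]
  · have he : PySem.List.pyRange 0 (n-1) 1 = [] := by
      rw [PySem.List.pyRange_one]
      have hz : (n - 1 - 0).toNat = 0 := by omega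
      rw [hz]
      simp
    simp only [he, List.foldl_nil]
    rw [foldl_id_aux]
    rfl

theorem coords_bounds {g : List (List (Option Char))} {m n : Int}
    (h : pvCoords g m n ≠ []) : 2 ≤ m ∧ 2 ≤ n := by
  constructor
  · by_contra hm
    exact h (coords_empty_small (Or.inl (by omega)))
  · by_contra hn
    exact h (coords_empty_small (Or.inr (by omega)))

-- ---------- single-column behaviour of the gravity loop ----------

def pvFindBc (fc : List Int) (b : Int) : Int :=
  if h : 0 ≤ b ∧ fc.getD b.toNat 0 = 1 then pvFindBc fc (b - 1) else b
termination_by (b + 1).toNat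
decreasing_by omega

def pvColStep (cf : List (Option Char) × List Int) (i : Int) :
    List (Option Char) × List Int :=
  if cf.2.getD i.toNat 0 = 1 then
    if pvFindBc cf.2 (i - 1) < 0 then (cf.1.set i.toNat none, cf.2)
    else (cf.1.set i.toNat (cf.1.getD (pvFindBc cf.2 (i - 1)).toNat none),
          cf.2.set (pvFindBc cf.2 (i - 1)).toNat 1)
  else cf

-- survivors of a column, top to bottom
def survL (c : List (Option Char)) (fc : List Int) : List (Option Char) :=
  ((List.range fc.length).filter (fun k => fc.getD k 0 != 1)).map (fun k => c.getD k none)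

theorem findB_colF (f : List (List Int)) (j : Int) (b : Int) :
    pvFindB f j b = pvFindBc (colF j.toNat f 0) b := by
  induction hk : (b+1).toNat generalizing b with
  | zero =>
    conv_lhs => rw [pvFindB]
    conv_rhs => rw [pvFindBc]
    rw [dif_neg (fun hx => absurd hx.1 (by omega)), dif_neg (fun hx => absurd hx.1 (by omega))]
  | succ k ih =>
    conv_lhs => rw [pvFindB]
    conv_rhs => rw [pvFindBc]
    have hg : pvGet2 f 0 b j = (colF j.toNat f 0).getD b.toNat 0 := pvGet2_colF f 0 b j
    by_cases hc : 0 ≤ b ∧ pvGet2 f 0 b j = 1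
    · rw [dif_pos hc, dif_pos ⟨hc.1, hg ▸ hc.2⟩]
      exact ih (b-1) (by omega)
    · rw [dif_neg hc, dif_neg (fun hx => hc ⟨hx.1, hg.trans hx.2⟩)]

theorem pvFindBc_le (fc : List Int) (b : Int) : pvFindBc fc b ≤ b := by
  fun_induction pvFindBc with
  | case1 b h ih => omega
  | case2 b h => omega

theorem pvFindBc_append (fc : List Int) (y : Int) : ∀ (b : Int), b < (fc.length : Int) →
    pvFindBc (fc ++ [y]) b = pvFindBc fc b := by
  intro b
  induction hk : (b+1).toNat generalizing b with
  | zero =>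
    intro hb
    conv_lhs => rw [pvFindBc]
    conv_rhs => rw [pvFindBc]
    rw [dif_neg (fun hx => absurd hx.1 (by omega)), dif_neg (fun hx => absurd hx.1 (by omega))]
  | succ k ih =>
    intro hb
    conv_lhs => rw [pvFindBc]
    conv_rhs => rw [pvFindBc]
    have hget : (fc ++ [y]).getD b.toNat 0 = fc.getD b.toNat 0 := by
      by_cases h0 : 0 ≤ b
      · have hlt : b.toNat < fc.length := by omega
        simp [List.getD_eq_getElem?_getD, List.getElem?_append_left hlt]
      · have hlt : b.toNat < fc.length ∨ fc.length = 0 := by omega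
        rcases hlt with hlt | hlt
        · simp [List.getD_eq_getElem?_getD, List.getElem?_append_left hlt]
        · omega
    by_cases hc : 0 ≤ b ∧ fc.getD b.toNat 0 = 1
    · rw [dif_pos ⟨hc.1, hget.trans hc.2⟩, dif_pos hc]
      exact ih (b-1) (by omega) (by omega)
    · rw [dif_neg (fun hx => hc ⟨hx.1, hget.symm.trans hx.2⟩), dif_neg hc]

theorem survL_append (c : List (Option Char)) (fc : List Int) (x : Option Char) (y : Int)
    (hl : fc.length = c.length) :
    survL (c ++ [x]) (fc ++ [y]) = survL c fc ++ (if y = 1 then [] else [x]) := by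
  unfold survL
  have hlen : (fc ++ [y]).length = fc.length + 1 := by simp
  rw [hlen, List.range_succ, List.filter_append, List.map_append]
  have hf : (List.range fc.length).filter (fun k => (fc ++ [y]).getD k 0 != 1)
      = (List.range fc.length).filter (fun k => fc.getD k 0 != 1) := by
    apply List.filter_congr
    intro k hk
    have hk' : k < fc.length := List.mem_range.mp hk
    simp [List.getD_eq_getElem?_getD, List.getElem?_append_left hk']
  rw [hf]
  congr 1
  · apply List.map_congr_left
    intro k hk
    have hk' : k < fc.length := List.mem_range.mp (List.mem_of_mem_filter hk)
    have hkc : k < c.length := by omega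
    simp [List.getD_eq_getElem?_getD, List.getElem?_append_left hkc]
  · have hy : (fc ++ [y]).getD fc.length 0 = y := by
      simp [List.getD_eq_getElem?_getD, List.getElem?_append_right (Nat.le_refl fc.length)]
    by_cases h1 : y = 1
    · simp [List.filter_cons, hy, h1]
    · simp only [List.filter_cons, List.filter_nil, hy]
      rw [if_pos (by simpa using h1)]
      simp only [List.map_cons, List.map_nil]
      rw [if_neg h1, hl]
      congr 1
      simp [List.getD_eq_getElem?_getD, List.getElem?_append_right (Nat.le_refl c.length)]

theorem survL_nil : survL [] [] = [] := by simp [survL]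

theorem survL_length_le (c : List (Option Char)) (fc : List Int) :
    (survL c fc).length ≤ fc.length := by
  unfold survL
  rw [List.length_map]
  exact le_trans (List.length_filter_le _ _) (by rw [List.length_range])

theorem findB_surv (fc : List Int) (c : List (Option Char)) (hl : fc.length = c.length) :
    (survL c fc = [] ∧ pvFindBc fc ((fc.length : Int) - 1) = -1)
    ∨ (∃ z : Nat, pvFindBc fc ((fc.length : Int) - 1) = (z : Int) ∧ z < fc.length ∧
        survL c fc = survL c (fc.set z 1) ++ [c.getD z none]) := by
  induction fc using List.reverseRecOn generalizing c with
  | nil =>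
    left
    have hc : c = [] := by
      rw [← List.length_eq_zero_iff]
      have := hl
      simp at this
      omega
    subst hc
    refine ⟨survL_nil, ?_⟩
    conv_lhs => rw [pvFindBc]
    rw [dif_neg (fun hx => absurd hx.1 (by norm_num))]
    norm_num
  | append_singleton f₀ y ih =>
    have hcne : c ≠ [] := by
      intro hc
      rw [hc] at hl
      simp at hl
    obtain ⟨c₀, x, rfl⟩ : ∃ c₀ x, c = c₀ ++ [x] :=
      ⟨c.dropLast, c.getLast hcne, (List.dropLast_append_getLast hcne).symm⟩
    have hl₀ : f₀.length = c₀.length := by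
      have := hl
      simp only [List.length_append, List.length_cons, List.length_nil] at this
      omega
    have hlen1 : (((f₀ ++ [y]).length : Int)) - 1 = (f₀.length : Int) := by simp
    rw [hlen1]
    have hgety : (f₀ ++ [y]).getD ((f₀.length : Int)).toNat 0 = y := by
      rw [Int.toNat_natCast, List.getD_eq_getElem?_getD,
        List.getElem?_append_right (Nat.le_refl f₀.length)]
      simp
    by_cases hy : y = 1
    · have hF : pvFindBc (f₀ ++ [y]) ((f₀.length : Int)) = pvFindBc f₀ ((f₀.length : Int) - 1) := by
        conv_lhs => rw [pvFindBc]
        rw [dif_pos ⟨by positivity, by rw [hgety]; exact hy⟩]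
        exact pvFindBc_append f₀ y ((f₀.length : Int) - 1) (by omega)
      rcases ih c₀ hl₀ with ⟨hs0, hf0⟩ | ⟨z, hz, hzlen, hsurv⟩
      · left
        rw [survL_append c₀ f₀ x y hl₀, if_pos hy, hs0, hF, hf0]
        simp
      · right
        refine ⟨z, by rw [hF, hz], by simp; omega, ?_⟩
        have hset : (f₀ ++ [y]).set z 1 = f₀.set z 1 ++ [y] := by
          rw [List.set_append, if_pos hzlen]
        rw [survL_append c₀ f₀ x y hl₀, if_pos hy, List.append_nil, hsurv, hset,
          survL_append c₀ (f₀.set z 1) x y (by simp [hl₀]), if_pos hy, List.append_nil]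
        congr 1
        simp [List.getD_eq_getElem?_getD, List.getElem?_append_left (show z < c₀.length from by omega)]
    · right
      refine ⟨f₀.length, ?_, by simp, ?_⟩
      · conv_lhs => rw [pvFindBc]
        rw [dif_neg (fun hx => hy (hgety.symm.trans hx.2))]
      · have hset : (f₀ ++ [y]).set f₀.length 1 = f₀ ++ [1] := by
          rw [List.set_append, if_neg (by omega)]
          simp
        rw [survL_append c₀ f₀ x y hl₀, if_neg hy, hset,
          survL_append c₀ f₀ x 1 hl₀, if_pos rfl, List.append_nil]
        congr 1
        rw [hl₀, List.getD_eq_getElem?_getD, List.getElem?_append_right (Nat.le_refl c₀.length)]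
        simp

theorem pvColStep_length (cf : List (Option Char) × List Int) (i : Int) :
    (pvColStep cf i).1.length = cf.1.length ∧ (pvColStep cf i).2.length = cf.2.length := by
  unfold pvColStep
  split_ifs <;> simp

theorem pvColStep_append (c₀ : List (Option Char)) (f₀ : List Int) (u : Option Char) (w : Int)
    (hl : f₀.length = c₀.length) (i : Int) (h0 : 0 ≤ i) (hi : i < (c₀.length : Int)) :
    pvColStep (c₀ ++ [u], f₀ ++ [w]) i
      = ((pvColStep (c₀, f₀) i).1 ++ [u], (pvColStep (c₀, f₀) i).2 ++ [w]) := by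
  unfold pvColStep
  have hif : i.toNat < f₀.length := by omega
  have hic : i.toNat < c₀.length := by omega
  have hg2 : (f₀ ++ [w]).getD i.toNat 0 = f₀.getD i.toNat 0 := by
    simp [List.getD_eq_getElem?_getD, List.getElem?_append_left hif]
  simp only [hg2]
  by_cases hc : f₀.getD i.toNat 0 = 1
  · rw [if_pos hc, if_pos hc]
    have hfb : pvFindBc (f₀ ++ [w]) (i - 1) = pvFindBc f₀ (i - 1) :=
      pvFindBc_append f₀ w (i - 1) (by omega)
    rw [hfb]
    by_cases hb : pvFindBc f₀ (i - 1) < 0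
    · rw [if_pos hb, if_pos hb]
      have hset : (c₀ ++ [u]).set i.toNat none = c₀.set i.toNat none ++ [u] := by
        rw [List.set_append, if_pos hic]
      simp [hset]
    · rw [if_neg hb, if_neg hb]
      have hble : pvFindBc f₀ (i - 1) ≤ i - 1 := pvFindBc_le _ _
      have hbf : (pvFindBc f₀ (i - 1)).toNat < f₀.length := by omega
      have hbc : (pvFindBc f₀ (i - 1)).toNat < c₀.length := by omega
      have hgd : (c₀ ++ [u]).getD (pvFindBc f₀ (i - 1)).toNat none
          = c₀.getD (pvFindBc f₀ (i - 1)).toNat none := by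
        simp [List.getD_eq_getElem?_getD, List.getElem?_append_left hbc]
      have hset1 : (c₀ ++ [u]).set i.toNat ((c₀ ++ [u]).getD (pvFindBc f₀ (i - 1)).toNat none)
          = c₀.set i.toNat (c₀.getD (pvFindBc f₀ (i - 1)).toNat none) ++ [u] := by
        rw [hgd, List.set_append, if_pos hic]
      have hset2 : (f₀ ++ [w]).set (pvFindBc f₀ (i - 1)).toNat 1
          = f₀.set (pvFindBc f₀ (i - 1)).toNat 1 ++ [w] := by
        rw [List.set_append, if_pos hbf]
      rw [Prod.mk.injEq]
      exact ⟨by rw [hset1], by rw [hset2]⟩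
  · rw [if_neg hc, if_neg hc]

theorem foldl_pvColStep_append (c₀ : List (Option Char)) (f₀ : List Int) (u : Option Char) (w : Int)
    (hl : f₀.length = c₀.length) (is : List Int) (his : ∀ i ∈ is, 0 ≤ i ∧ i < (c₀.length : Int)) :
    is.foldl pvColStep (c₀ ++ [u], f₀ ++ [w])
      = ((is.foldl pvColStep (c₀, f₀)).1 ++ [u], (is.foldl pvColStep (c₀, f₀)).2 ++ [w]) := by
  induction is generalizing c₀ f₀ with
  | nil => rfl
  | cons i is ih =>
    simp only [List.foldl_cons]
    obtain ⟨h0, hi⟩ := his i (by simp)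
    rw [pvColStep_append c₀ f₀ u w hl i h0 hi]
    have hlens := pvColStep_length (c₀, f₀) i
    have := ih (pvColStep (c₀, f₀) i).1 (pvColStep (c₀, f₀) i).2
      (by rw [hlens.1, hlens.2]; exact hl)
      (fun x hx => by rw [hlens.1]; exact his x (by simp [hx]))
    rw [this]

theorem pyRange_neg_nil (a : Int) (h : a < 0) : PySem.List.pyRange a (-1) (-1) = [] := by
  unfold PySem.List.pyRange
  have h1 : ¬((-1:Int) = 0) := by decide
  have h3 : ¬((-1:Int) < a) := by omega
  simp [h1, h3]

theorem pyRange_neg_cons (a : Int) (h : 0 ≤ a) :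
    PySem.List.pyRange a (-1) (-1) = a :: PySem.List.pyRange (a-1) (-1) (-1) := by
  by_cases h0 : 0 ≤ a - 1
  · unfold PySem.List.pyRange
    have h2 : ¬((0:Int) < -1) := by decide
    have h3 : (-1:Int) < a := by omega
    have h4 : (-1:Int) < a - 1 := by omega
    simp only [if_neg (by decide : ¬((-1:Int) = 0)), if_neg h2, if_pos h3, if_pos h4]
    have e1 : (a - -1 + - -1 - 1) / - -1 = a + 1 := by norm_num
    have e2 : (a - 1 - -1 + - -1 - 1) / - -1 = a := by norm_num
    rw [e1, e2]
    have e3 : (a+1).toNat = a.toNat + 1 := by omega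
    rw [e3, List.range_succ_eq_map]
    simp only [List.map_cons, List.map_map]
    refine List.cons_eq_cons.mpr ⟨by norm_num, ?_⟩
    apply List.map_congr_left
    intro k _
    simp [Function.comp]
    push_cast
    ring
  · have ha : a = 0 := by omega
    subst ha
    rw [pyRange_neg_nil (0-1) (by omega)]
    decide

theorem mem_pyRange_neg (a : Int) (x : Int) (hx : x ∈ PySem.List.pyRange a (-1) (-1)) :
    0 ≤ x ∧ x ≤ a := by
  induction hk : (a+1).toNat generalizing a with
  | zero =>
    rw [pyRange_neg_nil a (by omega)] at hx
    simp at hx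
  | succ k ih =>
    rw [pyRange_neg_cons a (by omega)] at hx
    rcases List.mem_cons.mp hx with rfl | hx
    · omega
    · have := ih (a-1) hx (by omega)
      omega

-- the heart: the bottom-up pull loop repacks the column as padding ++ survivors
theorem col_pull (c : List (Option Char)) (fc : List Int) (hl : fc.length = c.length) :
    ((PySem.List.pyRange ((c.length : Int) - 1) (-1) (-1)).foldl pvColStep (c, fc)).1
      = List.replicate (c.length - (survL c fc).length) none ++ survL c fc := by
  induction c using List.reverseRecOn generalizing fc with
  | nil =>
    have hfc : fc = [] := by
      rw [← List.length_eq_zero_iff]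
      simpa using hl
    subst hfc
    rw [show ((([]:List (Option Char)).length : Int) - 1) = -1 by simp, pyRange_neg_nil (-1) (by omega)]
    simp [survL_nil]
  | append_singleton c₀ x ih =>
    have hfne : fc ≠ [] := by
      intro h
      rw [h] at hl
      simp at hl
    obtain ⟨f₀, y, rfl⟩ : ∃ f₀ y, fc = f₀ ++ [y] :=
      ⟨fc.dropLast, fc.getLast hfne, (List.dropLast_append_getLast hfne).symm⟩
    have hl₀ : f₀.length = c₀.length := by
      simp only [List.length_append, List.length_cons, List.length_nil] at hl
      omega
    have hlen1 : (((c₀ ++ [x]).length : Int)) - 1 = (c₀.length : Int) := by simp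
    rw [hlen1, pyRange_neg_cons _ (by positivity), List.foldl_cons]
    have hrest : ∀ i ∈ PySem.List.pyRange ((c₀.length : Int) - 1) (-1) (-1),
        0 ≤ i ∧ i < (c₀.length : Int) := by
      intro i hi
      have := mem_pyRange_neg _ i hi
      omega
    have hcond : (f₀ ++ [y]).getD ((c₀.length : Int)).toNat 0 = y := by
      rw [Int.toNat_natCast, ← hl₀, List.getD_eq_getElem?_getD,
        List.getElem?_append_right (Nat.le_refl f₀.length)]
      simp
    have hsetx : ∀ v : Option Char, (c₀ ++ [x]).set ((c₀.length : Int)).toNat v = c₀ ++ [v] := by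
      intro v
      rw [Int.toNat_natCast, List.set_append, if_neg (by omega)]
      simp
    have hfb : pvFindBc (f₀ ++ [y]) ((c₀.length : Int) - 1) = pvFindBc f₀ ((f₀.length : Int) - 1) := by
      rw [show ((c₀.length : Int) - 1) = ((f₀.length : Int) - 1) by rw [hl₀]]
      exact pvFindBc_append f₀ y _ (by omega)
    by_cases hy : y = 1
    · rcases findB_surv f₀ c₀ hl₀ with ⟨hs0, hf0⟩ | ⟨z, hz, hzl, hsv⟩
      · have hstep : pvColStep (c₀ ++ [x], f₀ ++ [y]) ((c₀.length : Int)) = (c₀ ++ [none], f₀ ++ [y]) := by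
          unfold pvColStep
          simp only [hcond, hfb, hf0]
          rw [if_pos hy, if_pos (by norm_num : (-1:Int) < 0), hsetx]
        rw [hstep, foldl_pvColStep_append c₀ f₀ none y hl₀ _ hrest]
        have hproj : ∀ (p : List (Option Char) × List Int) (u : Option Char) (w : Int), ((p.1 ++ [u], p.2 ++ [w])).1 = p.1 ++ [u] := fun _ _ _ => rfl
        rw [hproj, ih f₀ hl₀, survL_append c₀ f₀ x y hl₀, if_pos hy, hs0]
        simp [List.replicate_succ']
      · have hzc : z < c₀.length := by omega
        have hstep : pvColStep (c₀ ++ [x], f₀ ++ [y]) ((c₀.length : Int))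
            = (c₀ ++ [c₀.getD z none], f₀.set z 1 ++ [y]) := by
          unfold pvColStep
          simp only [hcond, hfb, hz]
          rw [if_pos hy, if_neg (by omega : ¬(((z:Nat):Int) < 0))]
          have hv : (c₀ ++ [x]).getD (((z:Nat):Int)).toNat none = c₀.getD z none := by
            rw [Int.toNat_natCast, List.getD_eq_getElem?_getD, List.getElem?_append_left hzc,
              ← List.getD_eq_getElem?_getD]
          have hsetf : (f₀ ++ [y]).set (((z:Nat):Int)).toNat 1 = f₀.set z 1 ++ [y] := by
            rw [Int.toNat_natCast, List.set_append, if_pos hzl]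
          rw [hv, hsetx, hsetf]
        rw [hstep, foldl_pvColStep_append c₀ (f₀.set z 1) (c₀.getD z none) y (by simpa using hl₀) _ hrest]
        have hproj : ∀ (p : List (Option Char) × List Int) (u : Option Char) (w : Int), ((p.1 ++ [u], p.2 ++ [w])).1 = p.1 ++ [u] := fun _ _ _ => rfl
        rw [hproj, ih (f₀.set z 1) (by simpa using hl₀), survL_append c₀ f₀ x y hl₀, if_pos hy,
          List.append_nil, hsv]
        have hk' : (survL c₀ (f₀.set z 1)).length ≤ f₀.length := by
          have := survL_length_le c₀ (f₀.set z 1)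
          simpa using this
        have harith : (c₀ ++ [x]).length - (survL c₀ (f₀.set z 1) ++ [c₀.getD z none]).length
            = c₀.length - (survL c₀ (f₀.set z 1)).length := by
          simp <;> omega
        rw [harith, List.append_assoc]
    · have hstep : pvColStep (c₀ ++ [x], f₀ ++ [y]) ((c₀.length : Int)) = (c₀ ++ [x], f₀ ++ [y]) := by
        unfold pvColStep
        simp only [hcond]
        rw [if_neg hy]
      rw [hstep, foldl_pvColStep_append c₀ f₀ x y hl₀ _ hrest]
      have hproj : ∀ (p : List (Option Char) × List Int) (u : Option Char) (w : Int), ((p.1 ++ [u], p.2 ++ [w])).1 = p.1 ++ [u] := fun _ _ _ => rfl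
      rw [hproj, ih f₀ hl₀, survL_append c₀ f₀ x y hl₀, if_neg hy]
      have hk' : (survL c₀ f₀).length ≤ f₀.length := survL_length_le c₀ f₀
      have harith : (c₀ ++ [x]).length - (survL c₀ f₀ ++ [x]).length
          = c₀.length - (survL c₀ f₀).length := by
        simp <;> omega
      rw [harith, List.append_assoc]

-- ---------- commuting the row-major gravity loop into columns ----------

def pvGStep (st : (List (List (Option Char))) × (List (List Int))) (i j : Int) :
    (List (List (Option Char))) × (List (List Int)) :=
  if pvGet2 st.2 0 i j = 1 then
    if pvFindB st.2 j (i - 1) < 0 then (pvSet2 st.1 i.toNat j.toNat none, st.2)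
    else (pvSet2 st.1 i.toNat j.toNat (pvGet2 st.1 none (pvFindB st.2 j (i - 1)) j),
          pvSet2 st.2 (pvFindB st.2 j (i - 1)).toNat j.toNat 1)
  else st

theorem pvGrav_eq_fold (m n : Int) (st : (List (List (Option Char))) × (List (List Int))) :
    pvGrav m n st
      = (PySem.List.pyRange (m-1) (-1) (-1)).foldl
          (fun st i => (PySem.List.pyRange 0 n 1).foldl (fun st j => pvGStep st i j) st) st := rfl

theorem gstep_dims {N : Nat} (st : (List (List (Option Char))) × (List (List Int)))
    (hw1 : WFg N st.1) (hw2 : WFg N st.2) (i j : Int) :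
    WFg N (pvGStep st i j).1 ∧ WFg N (pvGStep st i j).2
    ∧ (pvGStep st i j).1.length = st.1.length ∧ (pvGStep st i j).2.length = st.2.length := by
  unfold pvGStep
  split_ifs
  · exact ⟨WFg_pvSet2 hw1 _ _ _, hw2, length_pvSet2 _ _ _ _, rfl⟩
  · exact ⟨WFg_pvSet2 hw1 _ _ _, WFg_pvSet2 hw2 _ _ _, length_pvSet2 _ _ _ _, length_pvSet2 _ _ _ _⟩
  · exact ⟨hw1, hw2, rfl, rfl⟩

theorem gstep_col_eq {N : Nat} (st : (List (List (Option Char))) × (List (List Int)))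
    (hw1 : WFg N st.1) (hw2 : WFg N st.2) (i j : Int) (hjN : j.toNat < N) :
    (colF j.toNat (pvGStep st i j).1 none, colF j.toNat (pvGStep st i j).2 0)
      = pvColStep (colF j.toNat st.1 none, colF j.toNat st.2 0) i := by
  unfold pvGStep pvColStep
  rw [pvGet2_colF st.2 0 i j, findB_colF st.2 j (i-1)]
  by_cases h1 : (colF j.toNat st.2 0).getD i.toNat 0 = 1
  · rw [if_pos h1, if_pos h1]
    by_cases h2 : pvFindBc (colF j.toNat st.2 0) (i-1) < 0
    · rw [if_pos h2, if_pos h2]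
      rw [Prod.mk.injEq]
      exact ⟨colF_pvSet2_eq st.1 none i.toNat j.toNat none hw1 hjN, rfl⟩
    · rw [if_neg h2, if_neg h2]
      rw [Prod.mk.injEq]
      constructor
      · rw [pvGet2_colF st.1 none (pvFindBc (colF j.toNat st.2 0) (i-1)) j]
        exact colF_pvSet2_eq st.1 none i.toNat j.toNat _ hw1 hjN
      · exact colF_pvSet2_eq st.2 0 _ j.toNat 1 hw2 hjN
  · rw [if_neg h1, if_neg h1]

theorem gstep_col_ne (st : (List (List (Option Char))) × (List (List Int)))
    (i j : Int) (j' : Nat) (hne : j' ≠ j.toNat) :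
    colF j' (pvGStep st i j).1 none = colF j' st.1 none
    ∧ colF j' (pvGStep st i j).2 0 = colF j' st.2 0 := by
  unfold pvGStep
  split_ifs
  · exact ⟨colF_pvSet2_ne st.1 none i.toNat j.toNat j' none hne, rfl⟩
  · exact ⟨colF_pvSet2_ne st.1 none i.toNat j.toNat j' _ hne,
      colF_pvSet2_ne st.2 0 _ j.toNat j' 1 hne⟩
  · exact ⟨rfl, rfl⟩

theorem ginner_cols {n : Int} {N : Nat} (hN : N = n.toNat) (i : Int) :
    ∀ (js : List Int), js.Nodup → (∀ x ∈ js, 0 ≤ x ∧ x < n) →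
    ∀ (st : (List (List (Option Char))) × (List (List Int))), WFg N st.1 → WFg N st.2 →
      (∀ j : Nat, j < N →
        (colF j (js.foldl (fun st j => pvGStep st i j) st).1 none,
         colF j (js.foldl (fun st j => pvGStep st i j) st).2 0)
          = if (j : Int) ∈ js then pvColStep (colF j st.1 none, colF j st.2 0) i
            else (colF j st.1 none, colF j st.2 0))
      ∧ WFg N (js.foldl (fun st j => pvGStep st i j) st).1
      ∧ WFg N (js.foldl (fun st j => pvGStep st i j) st).2
      ∧ (js.foldl (fun st j => pvGStep st i j) st).1.length = st.1.length
      ∧ (js.foldl (fun st j => pvGStep st i j) st).2.length = st.2.length := by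
  intro js
  induction js with
  | nil =>
    intro _ _ st hw1 hw2
    exact ⟨fun j hj => by simp, hw1, hw2, rfl, rfl⟩
  | cons j₀ js ih =>
    intro hnd hmem st hw1 hw2
    simp only [List.foldl_cons]
    have hd := gstep_dims st hw1 hw2 i j₀
    obtain ⟨hcols, hw1', hw2', hl1, hl2⟩ :=
      ih (List.nodup_cons.mp hnd).2 (fun x hx => hmem x (by simp [hx])) (pvGStep st i j₀) hd.1 hd.2.1
    refine ⟨?_, hw1', hw2', by rw [hl1, hd.2.2.1], by rw [hl2, hd.2.2.2]⟩
    intro j hj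
    rw [hcols j hj]
    by_cases hjj : (j : Int) = j₀
    · have hj0 : (j : Int) ∈ j₀ :: js := by simp [hjj]
      have hnin : (j : Int) ∉ js := by
        rw [hjj]
        exact (List.nodup_cons.mp hnd).1
      rw [if_neg hnin, if_pos hj0]
      have hjt : j₀.toNat = j := by omega
      have := gstep_col_eq st hw1 hw2 i j₀ (by rw [hjt]; exact hj)
      rw [hjt] at this
      exact this
    · have h0j₀ : 0 ≤ j₀ := (hmem j₀ (by simp)).1
      have hne := gstep_col_ne st i j₀ j (by intro he; exact hjj (by omega))
      rw [hne.1, hne.2]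
      have hmemiff : ((j : Int) ∈ j₀ :: js) ↔ ((j : Int) ∈ js) := by simp [hjj]
      simp only [hmemiff]

theorem grav_cols {n : Int} {N : Nat} (hN : N = n.toNat) :
    ∀ (is : List Int) (st : (List (List (Option Char))) × (List (List Int))),
      WFg N st.1 → WFg N st.2 →
      (∀ j : Nat, j < N →
        (colF j (is.foldl (fun st i => (PySem.List.pyRange 0 n 1).foldl (fun st j => pvGStep st i j) st) st).1 none,
         colF j (is.foldl (fun st i => (PySem.List.pyRange 0 n 1).foldl (fun st j => pvGStep st i j) st) st).2 0)
          = is.foldl pvColStep (colF j st.1 none, colF j st.2 0))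
      ∧ WFg N (is.foldl (fun st i => (PySem.List.pyRange 0 n 1).foldl (fun st j => pvGStep st i j) st) st).1
      ∧ (is.foldl (fun st i => (PySem.List.pyRange 0 n 1).foldl (fun st j => pvGStep st i j) st) st).1.length = st.1.length := by
  intro is
  induction is with
  | nil =>
    intro st hw1 hw2
    exact ⟨fun j hj => rfl, hw1, rfl⟩
  | cons i is ih =>
    intro st hw1 hw2
    simp only [List.foldl_cons]
    obtain ⟨hc, hw1', hw2', hl1, hl2⟩ :=
      ginner_cols hN i (PySem.List.pyRange 0 n 1) (PySem.List.nodup_pyRange_one 0 n)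
        (fun x hx => by
          have := (PySem.List.mem_pyRange_one (a := 0) (b := n) (x := x)).mp hx
          omega)
        st hw1 hw2
    obtain ⟨hc2, hw'', hl''⟩ := ih _ hw1' hw2'
    refine ⟨?_, hw'', by rw [hl'', hl1]⟩
    intro j hj
    rw [hc2 j hj]
    have hmem : (j : Int) ∈ PySem.List.pyRange 0 n 1 :=
      (PySem.List.mem_pyRange_one (a := 0) (b := n) (x := (j:Int))).mpr ⟨by positivity, by omega⟩
    rw [hc j hj, if_pos hmem]

-- ---------- the per-round equality ----------

theorem repack_dims (g : List (List (Option Char))) (s : PySem.Set (Int × Int)) (m n : Int) :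
    (pvRepack g s m n).length = m.toNat ∧ WFg n.toNat (pvRepack g s m n) := by
  constructor
  · simp [pvRepack, PySem.List.length_pyRange_one]
  · intro r hr
    simp only [pvRepack, List.mem_map] at hr
    obtain ⟨i, _, hr⟩ := hr
    simp [← hr, PySem.List.length_pyRange_one]

theorem pvGrid_dims (m n : Int) (board : List String) :
    (pvGrid m n board).length = m.toNat ∧ WFg n.toNat (pvGrid m n board) := by
  constructor
  · simp [pvGrid, PySem.List.length_pyRange_one]
  · intro r hr
    simp only [pvGrid, List.mem_map] at hr
    obtain ⟨i, _, hr⟩ := hr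
    simp [← hr, PySem.List.length_pyRange_one]

theorem pvGet2_natCast {α : Type} (L : List (List α)) (d : α) (i j : Nat) :
    pvGet2 L d (i : Int) (j : Int) = (L.getD i []).getD j d := by
  simp [pvGet2]

theorem getD_map_pyRange0 {α : Type} (F : Int → α) (n : Int) (j : Nat) (d : α) (hj : j < n.toNat) :
    ((PySem.List.pyRange 0 n 1).map F).getD j d = F (0 + (j : Int)) := by
  have hlen : j < ((PySem.List.pyRange 0 n 1).map F).length := by
    rw [List.length_map, PySem.List.length_pyRange_one]
    omega
  rw [List.getD_eq_getElem?_getD, List.getElem?_eq_getElem hlen]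
  simp [PySem.List.getElem_pyRange_one]

theorem pvRound_eq {g : List (List (Option Char))} {f s m n}
    (hs : SInv f s m.toNat n.toNat) (hg : g.length = m.toNat) (hwg : WFg n.toNat g)
    (hm : 2 ≤ m) (hn : 2 ≤ n) (hne : s ≠ []) :
    (pvGrav m n (g, f)).1 = pvRepack g s m n := by
  obtain ⟨hnd, hsum, hiff, h01, hfl, hwf2⟩ := hs
  have h0m : (0:Int) ≤ m := by omega
  have hsurvB : ∀ (jj : Int), 0 ≤ jj →
      ((PySem.List.pyRange 0 m 1).filter (fun i2 => !(PySem.Set.contains s (i2, jj)))).map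
        (fun i2 => pvGet2 g none i2 jj)
      = survL (colF jj.toNat g none) (colF jj.toNat f 0) := by
    intro jj h0jj
    have hrange : PySem.List.pyRange 0 m 1 = List.map (fun k : Nat => (k : Int)) (List.range m.toNat) := by
      rw [PySem.List.pyRange_one]
      have h6 : (m - 0).toNat = m.toNat := by omega
      rw [h6]
      apply List.map_congr_left
      intro k _
      omega
    rw [hrange, List.filter_map, List.map_map]
    unfold survL
    rw [length_colF, hfl]
    have hfilt : (List.range m.toNat).filter ((fun i2 => !(PySem.Set.contains s (i2, jj))) ∘ (fun k : Nat => (k:Int)))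
        = (List.range m.toNat).filter (fun k => (colF jj.toNat f 0).getD k 0 != 1) := by
      apply List.filter_congr
      intro k _
      simp only [Function.comp_apply]
      have hiq : ((colF jj.toNat f 0).getD k 0 = 1) ↔ (((k:Int), jj) ∈ s) := by
        have h1 := pvGet2_colF f 0 (k:Int) jj
        rw [Int.toNat_natCast] at h1
        rw [← h1]
        exact hiff (k:Int) jj (by positivity) h0jj
      by_cases hmem2 : ((k:Int), jj) ∈ s
      · have hco : PySem.Set.contains s ((k:Int), jj) = true := (PySem.Set.contains_iff s _).mpr hmem2
        have hv : (colF jj.toNat f 0).getD k 0 = 1 := hiq.mpr hmem2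
        rw [hco, hv]
        rfl
      · have hco : PySem.Set.contains s ((k:Int), jj) = false := by
          cases hb : PySem.Set.contains s ((k:Int), jj)
          · rfl
          · exact absurd ((PySem.Set.contains_iff s _).mp hb) hmem2
        have hv : ¬((colF jj.toNat f 0).getD k 0 = 1) := fun hh => hmem2 (hiq.mp hh)
        rw [hco]
        have hb2 : ((colF jj.toNat f 0).getD k 0 != 1) = true := bne_iff_ne.mpr hv
        rw [hb2]
        rfl
    rw [hfilt]
    apply List.map_congr_left
    intro k _
    simp only [Function.comp_apply]
    have h1 := pvGet2_colF g none (k:Int) jj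
    rw [Int.toNat_natCast] at h1
    exact h1
  rw [pvGrav_eq_fold]
  obtain ⟨hcols, hwL, hlenL⟩ := grav_cols (n := n) (N := n.toNat) rfl
    (PySem.List.pyRange (m-1) (-1) (-1)) (g, f) hwg hwf2
  obtain ⟨hRlen, hRwf⟩ := repack_dims g s m n
  apply List.ext_getElem
  · rw [hlenL, hRlen]
    exact hg
  · intro idx h1 h2
    apply List.ext_getElem
    · have hLr := hwL _ (List.getElem_mem h1)
      have hRr := hRwf _ (List.getElem_mem h2)
      rw [hLr, hRr]
    · intro jdx hj1 hj2
      have hjn : jdx < n.toNat := by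
        have := hwL _ (List.getElem_mem h1)
        omega
      have hidx : idx < m.toNat := by
        have h3 := hlenL
        simp only [] at h3
        have h4 : g.length = m.toNat := hg
        omega
      have e1 : (((PySem.List.pyRange (m-1) (-1) (-1)).foldl (fun st i => (PySem.List.pyRange 0 n 1).foldl (fun st j => pvGStep st i j) st) (g, f)).1).getD idx []
          = ((PySem.List.pyRange (m-1) (-1) (-1)).foldl (fun st i => (PySem.List.pyRange 0 n 1).foldl (fun st j => pvGStep st i j) st) (g, f)).1[idx]'h1 := by
        simp [List.getD_eq_getElem?_getD, List.getElem?_eq_getElem h1]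
      have hLel : (((PySem.List.pyRange (m-1) (-1) (-1)).foldl (fun st i => (PySem.List.pyRange 0 n 1).foldl (fun st j => pvGStep st i j) st) (g, f)).1[idx]'h1)[jdx]'hj1
          = (colF jdx ((PySem.List.pyRange (m-1) (-1) (-1)).foldl (fun st i => (PySem.List.pyRange 0 n 1).foldl (fun st j => pvGStep st i j) st) (g, f)).1 none).getD idx none := by
        rw [getD_colF, e1, List.getD_eq_getElem?_getD, List.getElem?_eq_getElem hj1]
        rfl
      have hcpair := hcols jdx hjn
      have hc1 : colF jdx ((PySem.List.pyRange (m-1) (-1) (-1)).foldl (fun st i => (PySem.List.pyRange 0 n 1).foldl (fun st j => pvGStep st i j) st) (g, f)).1 none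
          = ((PySem.List.pyRange (m-1) (-1) (-1)).foldl pvColStep (colF jdx g none, colF jdx f 0)).1 := by
        have h5 := congrArg Prod.fst hcpair
        simpa using h5
      have hlc : (colF jdx f 0).length = (colF jdx g none).length := by
        rw [length_colF, length_colF, hfl, hg]
      have hpull := col_pull (colF jdx g none) (colF jdx f 0) hlc
      have hrng : ((colF jdx g none).length : Int) - 1 = m - 1 := by
        rw [length_colF, hg]
        omega
      rw [hrng] at hpull
      have hclen : (colF jdx g none).length = m.toNat := by rw [length_colF, hg]
      rw [hLel, hc1, hpull, hclen]
      -- now the repack side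
      have hjlt : jdx < ((PySem.List.pyRange 0 n 1).map (fun j2 =>
          List.replicate (m - ((((PySem.List.pyRange 0 m 1).filter (fun i2 => !(PySem.Set.contains s (i2, j2)))).map (fun i2 => pvGet2 g none i2 j2)).length : Int)).toNat (none : Option Char)
          ++ ((PySem.List.pyRange 0 m 1).filter (fun i2 => !(PySem.Set.contains s (i2, j2)))).map (fun i2 => pvGet2 g none i2 j2))).length := by
        rw [List.length_map, PySem.List.length_pyRange_one]
        omega
      simp only [pvRepack, List.getElem_map, PySem.List.getElem_pyRange_one, zero_add]
      rw [pvGet2_natCast]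
      rw [getD_map_pyRange0 _ n jdx [] hjn]
      simp only [zero_add]
      rw [hsurvB (jdx : Int) (by positivity)]
      simp only [Int.toNat_natCast]
      have hpad : (m - ((survL (colF jdx g none) (colF jdx f 0)).length : Int)).toNat
          = m.toNat - (survL (colF jdx g none) (colF jdx f 0)).length := by
        omega
      rw [hpad]

theorem loop_eq (fuel : Nat) (m n : Int) :
    ∀ (g : List (List (Option Char))) (ans : Int),
      g.length = m.toNat → WFg n.toNat g →
      pvLoopA fuel m n g ans = pvLoopB fuel m n g ans := by
  induction fuel with
  | zero => intro g ans _ _; rfl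
  | succ fuel ih =>
    intro g ans hg hwg
    have hsync := mark_sync g m n
    have hcnt : pvCount (pvMark g m n) = ((pvCoords g m n).length : Int) := count_eq hsync
    by_cases hemp : pvCoords g m n = []
    · simp [pvLoopA, pvLoopB, hcnt, hemp]
    · obtain ⟨hm, hn⟩ := coords_bounds hemp
      have hlen : (pvCoords g m n).length ≠ 0 := by
        simpa [List.length_eq_zero_iff] using hemp
      have hround := pvRound_eq hsync hg hwg hm hn hemp
      have hdims := repack_dims g (pvCoords g m n) m n
      simp only [pvLoopA, pvLoopB, hcnt]
      rw [if_neg (by exact_mod_cast hlen), if_neg (by simpa [List.isEmpty_iff] using hemp)]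
      rw [hround]
      exact ih _ _ hdims.1 hdims.2

-- ===== VERDICT (by name: the statement is the Claim_ definition above) =====
theorem solution_spec : Claim_equal_solution := by
  intro m n board _ _
  unfold Spec_solution solution solution_alt
  exact loop_eq _ m n _ 0 (pvGrid_dims m n board).1 (pvGrid_dims m n board).2
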